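-- pv_equiv track=rewrite | github.com/pypi-data/pypi-mirror-317 | packages/geocoder-kr/geocoder_kr-0.21-py3-none-any.whl/src/geocoder/ReverseGeocoder.py | get_latest_addrs
-- ===== SOURCE A (Python) =====
-- def get_latest_addrs(addrs, shp_type):
--     """
--     주어진 주소 목록에서 shp_type에 해당하는 최신 주소를 반환합니다.
--
--     Args:
--         addrs (list): 주소 목록. 각 주소는 딕셔너리 형태로 되어 있으며,
--                       shp_type과 yyyymm 키를 포함해야 합니다.
--         shp_type (str): 주소에서 확인할 shp_type 키.
--
--     Returns:
--         list: shp_type에 해당하는 최신 주소들로 구성된 리스트.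
--     """
--     latest_addr = {}
--     for addr in addrs:
--         if shp_type in addr:
--             key = addr[shp_type]
--             yyyymm = addr["yyyymm"]
--             if not latest_addr.get(key) or yyyymm > latest_addr.get(key)["yyyymm"]:
--                 latest_addr[key] = addr
--     return list(latest_addr.values())
-- ===== SOURCE B (Python) =====
-- def get_latest_addrs(addrs, shp_type):
--     # partition-then-reduce: group addrs by their shp_type value, then take the
--     # first maximal addr (by yyyymm) of each group, in first-appearance key order
--     groups = {}
--     for addr in addrs:
--         if shp_type in addr:
--             groups.setdefault(addr[shp_type], []).append(addr)
--     return [max(group, key=lambda a: a["yyyymm"]) for group in groups.values()]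
-- ===== Notes on version B (the rewrite author's own statement) =====
-- stated objective: alternative
-- what changed: A fuses grouping and maximum-selection into one dict of running bests; B first partitions the addrs into per-key groups (setdefault/append) and then reduces each group with max(key=yyyymm) in a second pass.
import Mathlib
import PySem

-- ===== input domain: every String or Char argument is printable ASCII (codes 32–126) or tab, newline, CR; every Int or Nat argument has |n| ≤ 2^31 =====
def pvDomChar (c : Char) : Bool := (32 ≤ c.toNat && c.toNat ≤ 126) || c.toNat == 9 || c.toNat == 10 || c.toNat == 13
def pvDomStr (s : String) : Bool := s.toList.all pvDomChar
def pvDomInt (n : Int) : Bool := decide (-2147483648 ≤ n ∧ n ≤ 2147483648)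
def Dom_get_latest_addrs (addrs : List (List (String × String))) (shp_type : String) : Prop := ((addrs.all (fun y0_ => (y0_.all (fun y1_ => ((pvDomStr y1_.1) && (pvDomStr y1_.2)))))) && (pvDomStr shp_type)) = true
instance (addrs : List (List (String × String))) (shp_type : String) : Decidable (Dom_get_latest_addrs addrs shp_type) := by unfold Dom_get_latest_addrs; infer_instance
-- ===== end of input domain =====

-- B replaces A's fused "running best per key" dict by a partition-into-groups pass
-- followed by a per-group max(key=yyyymm) pass (alternative decomposition, same cost).

-- shared helper: Python dict lookup addr.get(k) on an addr given as an association list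
def pvLookup (addr : List (String × String)) (k : String) : Option String :=
  (PySem.Dict.mk addr).get? k

-- ===== PORT A =====
-- loop body of A's single for-loop (the dict maps key -> best addr so far)
def pvStepA (shp_type : String) (latest : PySem.Dict String (List (String × String)))
    (addr : List (String × String)) : PySem.Dict String (List (String × String)) :=
  match pvLookup addr shp_type with
  | none => latest
  | some key =>
    let yyyymm := (pvLookup addr "yyyymm").getD ""   -- addr["yyyymm"]; Pre_ guarantees the key is present
    match latest.get? key with
    | none => latest.insert key addr
    | some prev =>
      if prev = [] ∨ (pvLookup prev "yyyymm").getD "" < yyyymm then latest.insert key addr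
      else latest

def get_latest_addrs (addrs : List (List (String × String))) (shp_type : String) : List (List (String × String)) :=
  (addrs.foldl (pvStepA shp_type) PySem.Dict.empty).values

-- ===== PORT B =====
-- loop body of B's grouping pass: groups.setdefault(addr[shp_type], []).append(addr)
def pvStepB (shp_type : String) (groups : PySem.Dict String (List (List (String × String))))
    (addr : List (String × String)) : PySem.Dict String (List (List (String × String))) :=
  match pvLookup addr shp_type with
  | none => groups
  | some key => groups.modify key [] (fun grp => grp ++ [addr])

def get_latest_addrs_alt (addrs : List (List (String × String))) (shp_type : String) : List (List (String × String)) :=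
  let groups := addrs.foldl (pvStepB shp_type) PySem.Dict.empty
  -- [max(group, key=lambda a: a["yyyymm"]) for group in groups.values()] — every group is
  -- nonempty, so max never raises; max? = none only on [] and filterMap drops nothing
  groups.values.filterMap (fun grp => PySem.List.max? grp (fun a => (pvLookup a "yyyymm").getD ""))

-- ===== PRECONDITION & SPEC =====
-- Pre_ excludes exactly the inputs where Python A raises KeyError: an addr that has the
-- shp_type key but no "yyyymm" key (B raises there too).
def Pre_get_latest_addrs (addrs : List (List (String × String))) (shp_type : String) : Prop :=
  ∀ addr ∈ addrs, (pvLookup addr shp_type).isSome = true → (pvLookup addr "yyyymm").isSome = true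
instance (addrs : List (List (String × String))) (shp_type : String) : Decidable (Pre_get_latest_addrs addrs shp_type) := by unfold Pre_get_latest_addrs; infer_instance

def pvWitness_get_latest_addrs : (List (List (String × String))) × String :=
  ([[("t", "A"), ("yyyymm", "200001")], [("t", "A"), ("yyyymm", "202311")], [("u", "B")]], "t")

def Spec_get_latest_addrs (addrs : List (List (String × String))) (shp_type : String) (out : List (List (String × String))) : Prop := out = get_latest_addrs_alt addrs shp_type
instance (addrs : List (List (String × String))) (shp_type : String) (out : List (List (String × String))) : Decidable (Spec_get_latest_addrs addrs shp_type out) := by unfold Spec_get_latest_addrs; infer_instance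

-- ===== CLAIM (what is proved, stated in full; the proofs are below) =====
def Claim_equal_get_latest_addrs : Prop := ∀ (addrs : List (List (String × String))) (shp_type : String), Dom_get_latest_addrs addrs shp_type → Pre_get_latest_addrs addrs shp_type → Spec_get_latest_addrs addrs shp_type (get_latest_addrs addrs shp_type)

-- ===== LEMMAS AND PROOFS =====

-- the max key used throughout
def pvKeyf (a : List (String × String)) : String := (pvLookup a "yyyymm").getD ""
-- first maximal element of a group (meaningful on nonempty groups)
def pvMaxElt (g : List (List (String × String))) : List (String × String) :=
  (PySem.List.max? g pvKeyf).getD []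

lemma max?_append_singleton {α κ : Type} [LT κ] [DecidableLT κ] (g : List α) (x : α) (key : α → κ) :
    PySem.List.max? (g ++ [x]) key =
      match PySem.List.max? g key with
      | none => some x
      | some m => if key m < key x then some x else some m := by
  simp [PySem.List.max?, List.foldl_append]
  rfl

lemma get?_mk_map {γ δ : Type} (l : List (String × γ)) (f : γ → δ) (k : String) :
    (PySem.Dict.mk (l.map (fun p => (p.1, f p.2)))).get? k
      = ((PySem.Dict.mk l).get? k).map f := by
  induction l with
  | nil => rfl
  | cons p t ih =>
    obtain ⟨k', v⟩ := p
    simp only [List.map_cons, PySem.Dict.get?_mk_cons]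
    by_cases h : k' == k <;> simp [h, ih]

lemma pvStep_inv (shp_type : String) (addr : List (String × String))
    (dA : PySem.Dict String (List (String × String)))
    (dB : PySem.Dict String (List (List (String × String))))
    (hitems : dA.items = dB.items.map (fun p => (p.1, pvMaxElt p.2)))
    (hne : ∀ p ∈ dB.items, p.2 ≠ [] ∧ ∀ a ∈ p.2, a ≠ [])
    (hnd : dB.keys.Nodup) :
    (pvStepA shp_type dA addr).items
        = (pvStepB shp_type dB addr).items.map (fun p => (p.1, pvMaxElt p.2)) ∧
      (∀ p ∈ (pvStepB shp_type dB addr).items, p.2 ≠ [] ∧ ∀ a ∈ p.2, a ≠ []) ∧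
      (pvStepB shp_type dB addr).keys.Nodup := by
  unfold pvStepA pvStepB
  cases hk : pvLookup addr shp_type with
  | none => exact ⟨hitems, hne, hnd⟩
  | some key =>
    have haddr : addr ≠ [] := by
      intro h; rw [h] at hk
      simp [show pvLookup [] shp_type = none from rfl] at hk
    have hDA : dA = PySem.Dict.mk (dB.items.map (fun p => (p.1, pvMaxElt p.2))) :=
      PySem.Dict.ext hitems
    have hgetA : ∀ k, dA.get? k = (dB.get? k).map pvMaxElt := by
      intro k; rw [hDA]; exact get?_mk_map dB.items pvMaxElt k
    simp only []
    cases hB : dB.get? key with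
    | none =>
      have hcB : dB.contains key = false := by
        rw [PySem.Dict.contains_eq_isSome_get?, hB]; rfl
      have hA0 : dA.get? key = none := by rw [hgetA, hB]; rfl
      have hcA : dA.contains key = false := by
        rw [PySem.Dict.contains_eq_isSome_get?, hA0]; rfl
      simp only [hA0]
      have hmod : dB.modify key [] (fun grp => grp ++ [addr]) = dB.insert key [addr] := by
        unfold PySem.Dict.modify
        rw [PySem.Dict.getD_of_get?_eq_none _ _ hB]
        rfl
      rw [hmod, PySem.Dict.items_insert_of_not_contains _ _ hcA,
          PySem.Dict.items_insert_of_not_contains _ _ hcB]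
      refine ⟨?_, ?_, ?_⟩
      · rw [List.map_append, hitems]; rfl
      · intro p hp
        rcases List.mem_append.mp hp with h | h
        · exact hne p h
        · simp at h; subst h
          exact ⟨by simp, by intro a ha; simp at ha; subst ha; exact haddr⟩
      · have := PySem.Dict.keys_insert_of_not_contains dB (v := [addr]) hcB
        rw [this]
        have hk' : key ∉ dB.keys := (PySem.Dict.get?_eq_none_iff_not_mem_keys dB key).mp hB
        simp [List.nodup_append, hnd]
        exact fun a ha h => hk' (h ▸ ha)
    | some g =>
      have hgmem : (key, g) ∈ dB.items := PySem.Dict.mem_items_of_get?_eq_some dB hB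
      obtain ⟨hgne, hgels⟩ := hne (key, g) hgmem
      have hcB : dB.contains key = true := by
        rw [PySem.Dict.contains_eq_isSome_get?, hB]; rfl
      obtain ⟨m, hm⟩ : ∃ m, PySem.List.max? g pvKeyf = some m := by
        cases h : PySem.List.max? g pvKeyf with
        | none => exact absurd ((PySem.List.max?_eq_none_iff g pvKeyf).mp h) hgne
        | some m => exact ⟨m, rfl⟩
      have hmE : pvMaxElt g = m := by rw [pvMaxElt, hm]; rfl
      have hmne : m ≠ [] := hgels m (PySem.List.max?_mem hm)
      have hA0 : dA.get? key = some m := by rw [hgetA, hB, Option.map_some, hmE]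
      simp only [hA0]
      have hmod : dB.modify key [] (fun grp => grp ++ [addr]) = dB.insert key (g ++ [addr]) := by
        unfold PySem.Dict.modify
        rw [PySem.Dict.getD_of_get?_eq_some _ _ hB]
      have hmax' : pvMaxElt (g ++ [addr]) = if pvKeyf m < pvKeyf addr then addr else m := by
        rw [pvMaxElt, max?_append_singleton, hm]
        by_cases h : pvKeyf m < pvKeyf addr <;> simp [h]
      have hitemsB' : (dB.insert key (g ++ [addr])).items
          = dB.items.map (fun p => if p.1 == key then (key, g ++ [addr]) else p) :=
        PySem.Dict.items_insert_of_contains _ _ hcB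
      have hcond : ((pvLookup m "yyyymm").getD "" < (pvLookup addr "yyyymm").getD "")
          = (pvKeyf m < pvKeyf addr) := rfl
      refine ⟨?_, ?_, ?_⟩
      · rw [hmod, hitemsB']
        by_cases hlt : pvKeyf m < pvKeyf addr
        · have : (m = [] ∨ (pvLookup m "yyyymm").getD "" < (pvLookup addr "yyyymm").getD "") := Or.inr hlt
          rw [if_pos this]
          have hcA : dA.contains key = true := by
            rw [PySem.Dict.contains_eq_isSome_get?, hA0]; rfl
          rw [PySem.Dict.items_insert_of_contains _ _ hcA, hitems, List.map_map, List.map_map]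
          apply List.map_congr_left
          intro p _
          by_cases hp : p.1 == key <;> simp [Function.comp, hp, hmax', hlt]
        · rw [if_neg (by rintro (h | h); exacts [hmne h, hlt h]), hitems, List.map_map]
          apply List.map_congr_left
          intro p hp
          by_cases hpk : p.1 == key
          · have hpk' : p.1 = key := by simpa using hpk
            have : dB.get? p.1 = some p.2 := PySem.Dict.get?_of_mem_items dB (k := p.1) (v := p.2) (by simpa using hp) hnd
            rw [hpk', hB] at this
            have hpg : p.2 = g := by injection this with h; exact h.symm
            simp [Function.comp, hmax', hlt, hpg, hpk', hmE]
          · simp [Function.comp, hpk]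
      · intro p hp
        rw [hmod] at hp
        rcases (PySem.Dict.mem_items_insert dB key (g ++ [addr]) p).mp hp with h | h
        · subst h
          refine ⟨by simp [hgne], ?_⟩
          intro a ha
          rcases List.mem_append.mp ha with h' | h'
          · exact hgels a h'
          · simp at h'; subst h'; exact haddr
        · exact hne p h.1
      · rw [hmod]; exact PySem.Dict.nodup_keys_insert dB key (g ++ [addr]) hnd

lemma pvFold_inv (shp_type : String) (addrs : List (List (String × String)))
    (dA : PySem.Dict String (List (String × String)))
    (dB : PySem.Dict String (List (List (String × String))))
    (hitems : dA.items = dB.items.map (fun p => (p.1, pvMaxElt p.2)))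
    (hne : ∀ p ∈ dB.items, p.2 ≠ [] ∧ ∀ a ∈ p.2, a ≠ [])
    (hnd : dB.keys.Nodup) :
    (addrs.foldl (pvStepA shp_type) dA).items
        = (addrs.foldl (pvStepB shp_type) dB).items.map (fun p => (p.1, pvMaxElt p.2)) ∧
      (∀ p ∈ (addrs.foldl (pvStepB shp_type) dB).items, p.2 ≠ [] ∧ ∀ a ∈ p.2, a ≠ []) := by
  induction addrs generalizing dA dB with
  | nil => exact ⟨hitems, hne⟩
  | cons a t ih =>
    obtain ⟨h1, h2, h3⟩ := pvStep_inv shp_type a dA dB hitems hne hnd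
    exact ih _ _ h1 h2 h3

-- ===== VERDICT (by name: the statement is the Claim_ definition above) =====
theorem get_latest_addrs_spec : Claim_equal_get_latest_addrs := by
  intro addrs shp_type _ _
  unfold Spec_get_latest_addrs get_latest_addrs get_latest_addrs_alt
  obtain ⟨hitems, hne⟩ := pvFold_inv shp_type addrs PySem.Dict.empty PySem.Dict.empty rfl
    (by intro p hp; cases hp) (by simp [PySem.Dict.keys_empty])
  set dB := addrs.foldl (pvStepB shp_type) PySem.Dict.empty with hdB
  show (addrs.foldl (pvStepA shp_type) PySem.Dict.empty).values = _
  rw [show (addrs.foldl (pvStepA shp_type) PySem.Dict.empty).values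
        = (addrs.foldl (pvStepA shp_type) PySem.Dict.empty).items.map (fun x => x.2) from rfl]
  rw [hitems]
  show _ = dB.values.filterMap _
  rw [show dB.values = dB.items.map (fun x => x.2) from rfl]
  rw [List.filterMap_map, List.map_map]
  symm
  rw [List.filterMap_eq_map_iff_forall_eq_some]
  intro p hp
  have hg := (hne p hp).1
  obtain ⟨m, hm⟩ : ∃ m, PySem.List.max? p.2 pvKeyf = some m := by
    cases h : PySem.List.max? p.2 pvKeyf with
    | none => exact absurd ((PySem.List.max?_eq_none_iff p.2 pvKeyf).mp h) hg
    | some m => exact ⟨m, rfl⟩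
  have hm' : (PySem.List.max? p.2 fun a => (pvLookup a "yyyymm").getD "") = some m := hm
  simp [Function.comp, pvMaxElt, hm, hm']
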